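-- pv_equiv track=rewrite | github.com/eugen-paul/ProblemsPython | Codeforces/Problems/CodeforcesRound889D2/C1_Dual_EasyVersion.py | solve_pos
-- ===== SOURCE A (Python) =====
-- from typing import Deque, List, Dict, Set, Tuple, Counter
--
-- def is_decreasing(a: List[int]) -> bool:
--     for i in range(1, len(a)):
--         if a[i-1] > a[i]:
--             return True
--     return False
--
-- LIMIT = 50
--
-- def solve_pos(a: List[int]) -> List[Tuple[int, int]]:
--     cnt = 0
--     pos = 1
--     resp = []
--     while is_decreasing(a) and cnt <= LIMIT+1:
--         if a[pos-1] > a[pos]: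
--             ma = max(a)
--             cnt += 1
--             resp.append((pos+1, a.index(ma)+1))
--             a[pos] += ma
--         else:
--             pos += 1
--     return resp
-- ===== SOURCE B (Python) =====
-- # Single forward pass with a local pair comparison and an incrementally
-- # maintained (max, first-index-of-max), instead of re-scanning the whole
-- # array (is_decreasing / max / index) on every loop iteration.
-- # Like A, mutates the argument list in place (same sequence of writes).
-- LIMIT = 50
--
-- def solve_pos(a):
--     resp = []
--     if not a:
--         return resp
--     ma, mi = a[0], 0
--     for i in range(1, len(a)):
--         if a[i] > ma:
--             ma, mi = a[i], i
--     cnt = 0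
--     for pos in range(1, len(a)):
--         while a[pos - 1] > a[pos]:
--             if cnt > LIMIT + 1:
--                 return resp
--             cnt += 1
--             resp.append((pos + 1, mi + 1))
--             a[pos] += ma
--             if a[pos] > ma:
--                 ma, mi = a[pos], pos
--             elif a[pos] == ma and pos < mi:
--                 mi = pos
--     return resp
-- ===== Notes on version B (the rewrite author's own statement) =====
-- stated objective: faster
-- what changed: A rescans the whole array every loop iteration (is_decreasing, max(a), a.index(ma)); B makes a single forward pass with a local pair comparison and maintains the running maximum and its first index incrementally, removing all inner scans.
import Mathlib
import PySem

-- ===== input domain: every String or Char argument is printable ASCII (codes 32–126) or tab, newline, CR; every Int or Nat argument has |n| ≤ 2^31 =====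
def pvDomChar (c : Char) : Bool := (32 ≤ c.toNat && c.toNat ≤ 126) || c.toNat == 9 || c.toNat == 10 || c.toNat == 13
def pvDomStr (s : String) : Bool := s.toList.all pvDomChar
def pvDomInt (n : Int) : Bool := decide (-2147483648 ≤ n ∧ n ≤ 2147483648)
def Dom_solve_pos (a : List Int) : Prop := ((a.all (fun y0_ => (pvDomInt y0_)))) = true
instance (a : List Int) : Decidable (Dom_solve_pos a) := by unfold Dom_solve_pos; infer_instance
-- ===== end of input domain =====

-- B replaces A's per-iteration full rescans (is_decreasing, max, index) by one forward
-- pass with a local pair comparison and an incrementally maintained (max, first index);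
-- the equivalence is about the RETURN value (both Pythons mutate the argument list with
-- the same sequence of writes, so the final array is also the same).

-- ===== PORT A =====
-- Python: for i in range(1, len(a)): if a[i-1] > a[i]: return True; return False
-- All indices lie in [0, len(a)); the getD default is never used.
def is_decreasing (a : List Int) : Bool :=
  (List.range' 1 (a.length - 1)).any (fun i => a.getD (i-1) 0 > a.getD i 0)

-- A's while loop; pos and cnt only ever increase from 1 resp. 0, so they are carried as Nat.
-- Each iteration increments cnt (capped at 52) or pos (≤ the last bad index < len(a)), so a
-- fuel of a.length + 60 is never exhausted (the simulation lemmas below prove it suffices).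
def loopA : Nat → List Int → Nat → Nat → List (Int × Int) → List (Int × Int)
  | 0, _, _, _, resp => resp
  | fuel+1, a, cnt, pos, resp =>
    if is_decreasing a ∧ cnt ≤ 51 then
      if a.getD (pos-1) 0 > a.getD pos 0 then
        let ma := ((PySem.List.max? a (fun x => x)).getD 0)      -- max(a); a ≠ [] here
        let idx := ((PySem.List.index? a ma).getD 0)             -- a.index(ma); ma ∈ a here
        loopA fuel (a.set pos (a.getD pos 0 + ma)) (cnt+1) pos
          (resp ++ [((pos : Int)+1, (idx : Int)+1)])
      else loopA fuel a cnt (pos+1) resp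
    else resp

def solve_pos (a : List Int) : List (Int × Int) :=
  loopA (a.length + 60) a 0 1 []

-- ===== PORT B =====
-- initial scan: ma, mi = a[0], 0; for i in range(1, len(a)): if a[i] > ma: ma, mi = a[i], i
def findMaxB (a : List Int) : Int × Nat :=
  (List.range' 1 (a.length - 1)).foldl
    (fun p i => if a.getD i 0 > p.1 then (a.getD i 0, i) else p) (a.getD 0 0, 0)

-- the inner 'while a[pos-1] > a[pos]' loop; Bool = true means 'return resp' (cnt cap hit)
def fixB (a : List Int) (pos cnt : Nat) (resp : List (Int × Int)) (ma : Int) (mi : Nat) :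
    (List Int × Nat × List (Int × Int) × Int × Nat) × Bool :=
  if a.getD (pos-1) 0 > a.getD pos 0 then
    if 51 < cnt then ((a, cnt, resp, ma, mi), true)
    else
      let resp' := resp ++ [((pos : Int)+1, (mi : Int)+1)]
      let a' := a.set pos (a.getD pos 0 + ma)
      let v := a'.getD pos 0
      let p := if v > ma then (v, pos) else if v = ma ∧ pos < mi then (ma, pos) else (ma, mi)
      fixB a' pos (cnt+1) resp' p.1 p.2
  else ((a, cnt, resp, ma, mi), false)
termination_by 52 - cnt
decreasing_by omega

-- the outer 'for pos in range(1, len(a))' loop (n = len(a) is fixed: set preserves length)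
def scanB (n : Nat) (a : List Int) (pos cnt : Nat) (resp : List (Int × Int))
    (ma : Int) (mi : Nat) : List (Int × Int) :=
  if pos < n then
    match fixB a pos cnt resp ma mi with
    | ((_, _, resp', _, _), true) => resp'
    | ((a', cnt', resp', ma', mi'), false) => scanB n a' (pos+1) cnt' resp' ma' mi'
  else resp
termination_by n - pos
decreasing_by omega

def solve_pos_alt (a : List Int) : List (Int × Int) :=
  if a = [] then []
  else
    let p := findMaxB a
    scanB a.length a 1 0 [] p.1 p.2

-- ===== PRECONDITION & SPEC =====
def Spec_solve_pos (a : List Int) (out : List (Int × Int)) : Prop := out = solve_pos_alt a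
instance (a : List Int) (out : List (Int × Int)) : Decidable (Spec_solve_pos a out) := by unfold Spec_solve_pos; infer_instance

-- ===== CLAIM (what is proved, stated in full; the proofs are below) =====
def Claim_equal_solve_pos : Prop := ∀ (a : List Int), Dom_solve_pos a → Spec_solve_pos a (solve_pos a)

-- ===== LEMMAS AND PROOFS =====

-- getD / set bookkeeping
theorem getD_set_self (l : List Int) (i : Nat) (v : Int) (h : i < l.length) :
    (l.set i v).getD i 0 = v := by
  simp [List.getD_eq_getElem?_getD, h]

theorem getD_set_ne (l : List Int) (i j : Nat) (v : Int) (h : i ≠ j) :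
    (l.set i v).getD j 0 = l.getD j 0 := by
  simp [List.getD_eq_getElem?_getD, h]

theorem getD_mem (l : List Int) (j : Nat) (h : j < l.length) : l.getD j 0 ∈ l := by
  rw [List.getD_eq_getElem l 0 h]; exact List.getElem_mem h

-- pairs strictly before pos are non-decreasing
def SortedUpTo (a : List Int) (pos : Nat) : Prop :=
  ∀ i, 1 ≤ i → i < pos → i < a.length → a.getD (i-1) 0 ≤ a.getD i 0

-- (ma, mi) is the maximum of a together with its first index
def MaxInv (a : List Int) (ma : Int) (mi : Nat) : Prop :=
  mi < a.length ∧ a.getD mi 0 = ma ∧ (∀ x ∈ a, x ≤ ma) ∧ (∀ j, j < mi → a.getD j 0 ≠ ma)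

-- is_decreasing characterisation
theorem isdec_of_bad {a : List Int} {i : Nat} (h1 : 1 ≤ i) (h2 : i < a.length)
    (h : a.getD (i-1) 0 > a.getD i 0) : is_decreasing a = true := by
  unfold is_decreasing
  rw [List.any_eq_true]
  exact ⟨i, by rw [List.mem_range'_1]; omega, by simpa using h⟩

theorem isdec_false_iff (a : List Int) :
    is_decreasing a = false ↔ ∀ i, 1 ≤ i → i < a.length → a.getD (i-1) 0 ≤ a.getD i 0 := by
  unfold is_decreasing
  rw [List.any_eq_false]
  constructor
  · intro h i h1 h2
    have := h i (by rw [List.mem_range'_1]; omega)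
    simpa using this
  · intro h i hi
    rw [List.mem_range'_1] at hi
    simpa using h i hi.1 (by omega)

-- A's max(a) under the invariant
theorem maxA_eq {a : List Int} {ma : Int} {mi : Nat} (h : MaxInv a ma mi) :
    (PySem.List.max? a (fun x => x)).getD 0 = ma := by
  obtain ⟨hmi, hval, hub, _⟩ := h
  have hne : a ≠ [] := by intro he; rw [he] at hmi; simp at hmi
  cases hm : PySem.List.max? a (fun x => x) with
  | none => exact absurd ((PySem.List.max?_eq_none_iff a (fun x => x)).mp hm) hne
  | some m =>
    have hmem : m ∈ a := PySem.List.max?_mem hm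
    have hle : ∀ y ∈ a, y ≤ m := PySem.List.max?_isMax hm
    have h1 : m ≤ ma := hub m hmem
    have h2 : ma ≤ m := by
      have := hle (a.getD mi 0) (getD_mem a mi hmi)
      rwa [hval] at this
    simp [le_antisymm h1 h2]

-- A's a.index(ma) under the invariant
theorem indexA_eq : ∀ (a : List Int) (ma : Int) (mi : Nat), mi < a.length →
    a.getD mi 0 = ma → (∀ j, j < mi → a.getD j 0 ≠ ma) →
    PySem.List.index? a ma = some mi := by
  intro a
  induction a with
  | nil => intro ma mi h; simp at h
  | cons x t ih =>
    intro ma mi hlen hval hfst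
    cases mi with
    | zero =>
      simp at hval
      rw [← hval]
      exact PySem.List.index?_cons_self x t
    | succ k =>
      have hx : x ≠ ma := by have := hfst 0 (by omega); simpa using this
      rw [PySem.List.index?_cons_of_ne t hx]
      have : PySem.List.index? t ma = some k := by
        apply ih
        · simpa using hlen
        · simpa using hval
        · intro j hj
          have := hfst (j+1) (by omega)
          simpa using this
      rw [this]; rfl

-- the (max, first index) update performed by B after a[pos] += ma (proof-side copy of
-- the branch in fixB, used to state the update lemma)
def updMax (a' : List Int) (pos : Nat) (ma : Int) (mi : Nat) : Int × Nat :=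
  if a'.getD pos 0 > ma then (a'.getD pos 0, pos)
  else if a'.getD pos 0 = ma ∧ pos < mi then (ma, pos) else (ma, mi)

theorem maxinv_updMax {a : List Int} {ma : Int} {mi pos : Nat}
    (h : MaxInv a ma mi) (hpos : pos < a.length) (hlt : a.getD pos 0 < ma) :
    MaxInv (a.set pos (a.getD pos 0 + ma))
      (updMax (a.set pos (a.getD pos 0 + ma)) pos ma mi).1
      (updMax (a.set pos (a.getD pos 0 + ma)) pos ma mi).2 := by
  obtain ⟨hmi, hval, hub, hfst⟩ := h
  set a' := a.set pos (a.getD pos 0 + ma) with ha'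
  have hlen : a'.length = a.length := List.length_set ..
  have hv : a'.getD pos 0 = a.getD pos 0 + ma := getD_set_self a pos _ hpos
  have hold : ∀ j, j ≠ pos → a'.getD j 0 = a.getD j 0 := fun j hj =>
    getD_set_ne a pos j _ (fun he => hj he.symm)
  have hmem : ∀ x ∈ a', x = a.getD pos 0 + ma ∨ x ≤ ma := by
    intro x hx
    rcases List.mem_or_eq_of_mem_set hx with hx' | hx'
    · exact Or.inr (hub x hx')
    · exact Or.inl hx'
  have hmipos : mi ≠ pos := by
    intro he; rw [he] at hval; omega
  unfold updMax
  by_cases h1 : a'.getD pos 0 > ma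
  · rw [if_pos h1]
    refine ⟨by omega, rfl, ?_, ?_⟩
    · intro x hx
      rcases hmem x hx with hx' | hx' <;> omega
    · intro j hj
      dsimp only at hj ⊢
      rw [hold j (by omega)]
      have hj' : a.getD j 0 ≤ ma := hub _ (getD_mem a j (by omega))
      omega
  · rw [if_neg h1]
    by_cases h2 : a'.getD pos 0 = ma ∧ pos < mi
    · rw [if_pos h2]
      refine ⟨by omega, ?_, ?_, ?_⟩
      · dsimp only; omega
      · intro x hx
        rcases hmem x hx with hx' | hx' <;> omega
      · intro j hj
        dsimp only at hj ⊢
        rw [hold j (by omega)]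
        exact hfst j (by omega)
    · rw [if_neg h2]
      refine ⟨by omega, ?_, ?_, ?_⟩
      · dsimp only
        rw [hold mi hmipos]; exact hval
      · intro x hx
        rcases hmem x hx with hx' | hx' <;> omega
      · intro j hj
        dsimp only at hj ⊢
        by_cases hjp : j = pos
        · subst hjp
          rw [hv]; omega
        · rw [hold j hjp]
          exact hfst j hj

-- findMaxB establishes the invariant
theorem findMaxB_inv_aux (a : List Int) :
    ∀ n, n < a.length →
    ((List.range' 1 n).foldl
        (fun p i => if a.getD i 0 > p.1 then (a.getD i 0, i) else p) (a.getD 0 0, 0)).2 ≤ n ∧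
    a.getD ((List.range' 1 n).foldl
        (fun p i => if a.getD i 0 > p.1 then (a.getD i 0, i) else p) (a.getD 0 0, 0)).2 0
      = ((List.range' 1 n).foldl
        (fun p i => if a.getD i 0 > p.1 then (a.getD i 0, i) else p) (a.getD 0 0, 0)).1 ∧
    (∀ j, j ≤ n → a.getD j 0 ≤ ((List.range' 1 n).foldl
        (fun p i => if a.getD i 0 > p.1 then (a.getD i 0, i) else p) (a.getD 0 0, 0)).1) ∧
    (∀ j, j < ((List.range' 1 n).foldl
        (fun p i => if a.getD i 0 > p.1 then (a.getD i 0, i) else p) (a.getD 0 0, 0)).2 →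
      a.getD j 0 < ((List.range' 1 n).foldl
        (fun p i => if a.getD i 0 > p.1 then (a.getD i 0, i) else p) (a.getD 0 0, 0)).1) := by
  intro n
  induction n with
  | zero =>
    intro _
    refine ⟨by simp, by simp, ?_, by simp⟩
    intro j hj
    simp at hj
    subst hj; simp
  | succ k ih =>
    intro hk
    have ihk := ih (by omega)
    rw [List.range'_concat, List.foldl_append]
    simp only [Nat.one_mul, List.foldl_cons, List.foldl_nil]
    set p := (List.range' 1 k).foldl
        (fun p i => if a.getD i 0 > p.1 then (a.getD i 0, i) else p) (a.getD 0 0, 0) with hp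
    obtain ⟨i1, i2, i3, i4⟩ := ihk
    by_cases hgt : a.getD (1+k) 0 > p.1
    · rw [if_pos hgt]
      refine ⟨by dsimp only; omega, rfl, ?_, ?_⟩
      · intro j hj
        dsimp only
        rcases Nat.lt_or_ge j (k+1) with hj' | hj'
        · have := i3 j (by omega); omega
        · have hje : j = 1 + k := by omega
          subst hje; omega
      · intro j hj
        dsimp only at hj ⊢
        have := i3 j (by omega)
        omega
    · rw [if_neg hgt]
      refine ⟨by omega, i2, ?_, i4⟩
      intro j hj
      rcases Nat.lt_or_ge j (k+1) with hj' | hj'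
      · exact i3 j (by omega)
      · have hje : j = 1 + k := by omega
        subst hje; omega

theorem findMaxB_maxInv (a : List Int) (hne : a ≠ []) :
    MaxInv a (findMaxB a).1 (findMaxB a).2 := by
  have hlen : 1 ≤ a.length := by
    cases a with
    | nil => exact absurd rfl hne
    | cons x t => simp
  obtain ⟨i1, i2, i3, i4⟩ := findMaxB_inv_aux a (a.length - 1) (by omega)
  unfold findMaxB
  refine ⟨by omega, i2, ?_, fun j hj => ne_of_lt (i4 j hj)⟩
  intro x hx
  obtain ⟨j, hjl, hje⟩ := List.mem_iff_getElem.mp hx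
  have := i3 j (by omega)
  rwa [List.getD_eq_getElem a 0 hjl, hje] at this

-- scanB returns resp once the cnt cap is hit
theorem scanB_cap : ∀ (k n : Nat) (a : List Int) (pos cnt : Nat) (resp : List (Int × Int))
    (ma : Int) (mi : Nat), n - pos ≤ k → 52 ≤ cnt →
    scanB n a pos cnt resp ma mi = resp := by
  intro k
  induction k with
  | zero =>
    intro n a pos cnt resp ma mi hk hc
    rw [scanB, if_neg (by omega)]
  | succ k ih =>
    intro n a pos cnt resp ma mi hk hc
    rw [scanB]
    by_cases hp : pos < n
    · rw [if_pos hp]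
      rw [fixB]
      by_cases hb : a.getD (pos-1) 0 > a.getD pos 0
      · rw [if_pos hb, if_pos (by omega)]
      · rw [if_neg hb]
        exact ih n a (pos+1) cnt resp ma mi (by omega) hc
    · rw [if_neg hp]

-- scanB returns resp when no bad pair exists anywhere (the array never changes)
theorem scanB_sorted : ∀ (k : Nat) (a : List Int) (pos cnt : Nat) (resp : List (Int × Int))
    (ma : Int) (mi : Nat), a.length - pos ≤ k → 1 ≤ pos →
    (∀ i, 1 ≤ i → i < a.length → a.getD (i-1) 0 ≤ a.getD i 0) →
    scanB a.length a pos cnt resp ma mi = resp := by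
  intro k
  induction k with
  | zero =>
    intro a pos cnt resp ma mi hk _ _
    rw [scanB, if_neg (by omega)]
  | succ k ih =>
    intro a pos cnt resp ma mi hk h1 hs
    rw [scanB]
    by_cases hp : pos < a.length
    · rw [if_pos hp]
      rw [fixB, if_neg (by simpa using hs pos h1 hp)]
      exact ih a (pos+1) cnt resp ma mi (by omega) (by omega) hs
    · rw [if_neg hp]

-- one fix step of scanB (unfolds the inner while loop of B exactly once)
theorem scanB_fix_step (a : List Int) (pos cnt : Nat) (resp : List (Int × Int))
    (ma : Int) (mi : Nat) (hp : pos < a.length)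
    (hb : a.getD (pos-1) 0 > a.getD pos 0) (hc : cnt ≤ 51) :
    scanB a.length a pos cnt resp ma mi =
      scanB a.length (a.set pos (a.getD pos 0 + ma)) pos (cnt+1)
        (resp ++ [((pos : Int)+1, (mi : Int)+1)])
        (updMax (a.set pos (a.getD pos 0 + ma)) pos ma mi).1
        (updMax (a.set pos (a.getD pos 0 + ma)) pos ma mi).2 := by
  have hfix : fixB a pos cnt resp ma mi =
      fixB (a.set pos (a.getD pos 0 + ma)) pos (cnt+1)
        (resp ++ [((pos : Int)+1, (mi : Int)+1)])
        (updMax (a.set pos (a.getD pos 0 + ma)) pos ma mi).1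
        (updMax (a.set pos (a.getD pos 0 + ma)) pos ma mi).2 := by
    conv_lhs => rw [fixB]
    rw [if_pos hb, if_neg (by omega)]
    rfl
  conv_lhs => rw [scanB]
  conv_rhs => rw [scanB]
  rw [if_pos hp, if_pos (by simpa using hp), hfix]

-- main simulation: A's while loop equals B's scan, given the invariants
theorem simAB : ∀ (fuel : Nat) (a : List Int) (cnt pos : Nat) (resp : List (Int × Int))
    (ma : Int) (mi : Nat),
    1 ≤ pos → SortedUpTo a pos → MaxInv a ma mi →
    (a.length - pos) + (52 - cnt) + 1 ≤ fuel →
    loopA fuel a cnt pos resp = scanB a.length a pos cnt resp ma mi := by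
  intro fuel
  induction fuel with
  | zero => intro a cnt pos resp ma mi _ _ _ hf; omega
  | succ fuel ih =>
    intro a cnt pos resp ma mi h1 hs hm hf
    by_cases hp : pos < a.length
    · by_cases hb : a.getD (pos-1) 0 > a.getD pos 0
      · -- bad pair at pos
        have hd : is_decreasing a = true := isdec_of_bad h1 hp hb
        by_cases hc : cnt ≤ 51
        · -- both perform the fix
          have hma : (PySem.List.max? a (fun x => x)).getD 0 = ma := maxA_eq hm
          have hidx : (PySem.List.index? a ma).getD 0 = mi := by
            rw [indexA_eq a ma mi hm.1 hm.2.1 (fun j hj h => hm.2.2.2 j hj h)]; rfl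
          have hplt : a.getD pos 0 < ma := by
            have : a.getD (pos-1) 0 ≤ ma := hm.2.2.1 _ (getD_mem a (pos-1) (by omega))
            omega
          rw [loopA]
          rw [if_pos ⟨hd, hc⟩, if_pos hb]
          simp only [hma, hidx]
          rw [scanB_fix_step a pos cnt resp ma mi hp hb hc]
          have hlen : (a.set pos (a.getD pos 0 + ma)).length = a.length := List.length_set ..
          rw [← hlen]
          apply ih _ _ _ _ _ _ h1
          · intro i hi1 hi2 hi3
            rw [getD_set_ne a pos (i-1) _ (by omega), getD_set_ne a pos i _ (by omega)]
            exact hs i hi1 hi2 (by omega)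
          · exact maxinv_updMax hm hp hplt
          · rw [hlen]; omega
        · -- cnt cap hit: both return resp
          rw [loopA, if_neg (by tauto)]
          rw [scanB, if_pos hp, fixB, if_pos hb, if_pos (by omega)]
      · -- good pair at pos: B advances; A advances if still decreasing
        have hstep : scanB a.length a pos cnt resp ma mi =
            scanB a.length a (pos+1) cnt resp ma mi := by
          rw [scanB, if_pos hp, fixB, if_neg hb]
        rw [hstep, loopA]
        by_cases hd : is_decreasing a = true
        · by_cases hc : cnt ≤ 51
          · rw [if_pos ⟨hd, hc⟩, if_neg hb]
            apply ih _ _ _ _ _ _ (by omega) _ hm (by omega)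
            intro i hi1 hi2 hi3
            by_cases hie : i = pos
            · subst hie; omega
            · exact hs i hi1 (by omega) hi3
          · rw [if_neg (by tauto)]
            exact (scanB_cap (a.length - (pos+1)) a.length a (pos+1) cnt resp ma mi
              (by omega) (by omega)).symm
        · rw [if_neg (by tauto)]
          have hsrt := (isdec_false_iff a).mp (by simpa using hd)
          exact (scanB_sorted (a.length - (pos+1)) a (pos+1) cnt resp ma mi
            (by omega) (by omega) hsrt).symm
    · -- pos past the end: the sorted prefix covers the whole array
      have hd : is_decreasing a = false := by
        rw [isdec_false_iff]
        intro i hi1 hi2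
        exact hs i hi1 (by omega) hi2
      rw [loopA, if_neg (by simp [hd]), scanB, if_neg hp]

-- ===== VERDICT (by name: the statement is the Claim_ definition above) =====
theorem solve_pos_spec : Claim_equal_solve_pos := by
  intro a _
  unfold Spec_solve_pos solve_pos solve_pos_alt
  by_cases hne : a = []
  · subst hne; rfl
  · rw [if_neg hne]
    have hlen : 1 ≤ a.length := by
      cases a with
      | nil => exact absurd rfl hne
      | cons x t => simp
    exact simAB (a.length + 60) a 0 1 [] (findMaxB a).1 (findMaxB a).2
      (by omega) (fun i hi1 hi2 _ => by omega) (findMaxB_maxInv a hne) (by omega)
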